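-- pv_equiv track=rewrite | github.com/developav97-lgtm/saisuite | backend/apps/dashboard/services.py | _apply_overrides
-- ===== SOURCE A (Python) =====
-- def _apply_overrides(base_filters: list, overrides: list) -> list:
--     """
--     Aplica overrides de capa 2 sobre los filtros base.
--     Para cada override, busca un filtro coincidente por (source, field)
--     y reemplaza SOLO el value. Si no hay coincidencia, agrega el override.
--     """
--     import copy
--     merged = copy.deepcopy(base_filters)
--
--     for override in overrides:
--         src = override.get('source')
--         field = override.get('field')
--         value = override.get('value')
--
--         matched = False
--         for f in merged:
--             if f.get('source') == src and f.get('field') == field: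
--                 f['value'] = value
--                 matched = True
--                 break
--
--         if not matched:
--             merged.append(copy.deepcopy(override))
--
--     return merged
-- ===== SOURCE B (Python) =====
-- def _apply_overrides(base_filters: list, overrides: list) -> list:
--     """Single pass over overrides builds a (source, field) -> [last value,
--     first override, count] table; then one pass over base applies values to
--     the first matching filter per key; unmatched keys are appended in
--     first-seen order."""
--     import copy
--
--     table = {}  # (source, field) -> [last value seen, first override dict, count]
--     for override in overrides:
--         key = (override.get('source'), override.get('field'))
--         entry = table.get(key)
--         if entry is None:
--             table[key] = [override.get('value'), override, 1]
--         else: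
--             entry[0] = override.get('value')
--             entry[2] += 1
--
--     merged = copy.deepcopy(base_filters)
--     consumed = set()
--     for f in merged:
--         key = (f.get('source'), f.get('field'))
--         if key in table and key not in consumed:
--             f['value'] = table[key][0]
--             consumed.add(key)
--
--     for key, (last, first, count) in table.items():
--         if key not in consumed:
--             new = copy.deepcopy(first)
--             if count > 1:
--                 new['value'] = last
--             merged.append(new)
--
--     return merged
-- ===== Notes on version B (the rewrite author's own statement) =====
-- stated objective: faster
-- what changed: Instead of scanning the merged list once per override (nested loops), B builds a (source,field)->[last value, first override, count] dict in one pass over overrides, applies it in one pass over base (first matching filter per key only), and appends the never-matched first-occurrence overrides, with value overwritten to the last seen when the key occurred more than once.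
import Mathlib
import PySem

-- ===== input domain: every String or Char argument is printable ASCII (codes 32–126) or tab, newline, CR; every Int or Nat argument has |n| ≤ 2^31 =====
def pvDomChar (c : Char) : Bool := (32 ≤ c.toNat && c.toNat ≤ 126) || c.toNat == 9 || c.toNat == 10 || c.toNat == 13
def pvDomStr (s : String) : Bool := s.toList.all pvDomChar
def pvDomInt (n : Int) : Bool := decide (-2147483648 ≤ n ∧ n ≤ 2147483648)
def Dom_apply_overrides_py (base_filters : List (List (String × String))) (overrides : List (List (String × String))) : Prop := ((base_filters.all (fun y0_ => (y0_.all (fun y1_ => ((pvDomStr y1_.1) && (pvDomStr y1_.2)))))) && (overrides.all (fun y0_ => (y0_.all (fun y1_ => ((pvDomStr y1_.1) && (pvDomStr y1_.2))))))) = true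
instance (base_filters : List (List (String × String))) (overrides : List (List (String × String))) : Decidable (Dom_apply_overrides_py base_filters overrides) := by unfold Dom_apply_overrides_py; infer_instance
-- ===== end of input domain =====

-- B replaces A's per-override scan of the merged list (nested loops) by one table built over
-- overrides plus one pass over base and one append pass (objective: faster). Equivalence is
-- about the return value; A deep-copies, so neither version mutates its arguments.

-- shared Python-semantics primitives: dict.get and d['value'] = v on str→str dicts
abbrev pvD : Type := List (String × String)

abbrev pvK : Type := Option String × Option String

def pvGet (f : pvD) (k : String) : Option String := (PySem.Dict.mk f).get? k

def pvKeyOf (f : pvD) : pvK := (pvGet f "source", pvGet f "field")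

def pvSetV (f : pvD) (v : Option String) : pvD :=
  match v with
  | some s => ((PySem.Dict.mk f).insert "value" s).items
  | none => f

-- ===== PORT A =====
-- aUpd is the inner `for f in merged: … break` loop with its matched flag: the first filter
-- whose (source, field) pair equals k gets its value set; `none` means matched stayed False
def aUpd (k : pvK) (v : Option String) : List pvD → Option (List pvD)
  | [] => none
  | f :: rest =>
    if pvKeyOf f = k then some (pvSetV f v :: rest)
    else (aUpd k v rest).map (f :: ·)

def apply_overrides_py (base_filters : List (List (String × String))) (overrides : List (List (String × String))) : List (List (String × String)) :=
  overrides.foldl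
    (fun merged o =>
      match aUpd (pvKeyOf o) (pvGet o "value") merged with
      | some m => m
      | none => merged ++ [o])
    base_filters

-- ===== PORT B =====
-- table entry: (last value seen, first override dict, count)
abbrev pvE : Type := Option String × pvD × Nat

def bTstep : List (pvK × pvE) → pvD → List (pvK × pvE)
  | [], o => [(pvKeyOf o, (pvGet o "value", o, 1))]
  | (k, e) :: rest, o =>
    if k = pvKeyOf o then (k, (pvGet o "value", e.2.1, e.2.2 + 1)) :: rest
    else (k, e) :: bTstep rest o

def bLookup : List (pvK × pvE) → pvK → Option pvE
  | [], _ => none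
  | (k, e) :: rest, q => if k = q then some e else bLookup rest q

def bPass (T : List (pvK × pvE)) : List pvD → List pvK → List pvD × List pvK
  | [], c => ([], c)
  | f :: rest, c =>
    match bLookup T (pvKeyOf f) with
    | some e =>
      if pvKeyOf f ∈ c then
        let p := bPass T rest c
        (f :: p.1, p.2)
      else
        let p := bPass T rest (pvKeyOf f :: c)
        (pvSetV f e.1 :: p.1, p.2)
    | none =>
      let p := bPass T rest c
      (f :: p.1, p.2)

def bFin (e : pvE) : pvD := if 1 < e.2.2 then pvSetV e.2.1 e.1 else e.2.1

def bMerge (base : List pvD) (T : List (pvK × pvE)) : List pvD :=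
  let p := bPass T base []
  p.1 ++ (T.filter (fun en => decide (en.1 ∉ p.2))).map (fun en => bFin en.2)

def apply_overrides_py_alt (base_filters : List (List (String × String))) (overrides : List (List (String × String))) : List (List (String × String)) :=
  bMerge base_filters (overrides.foldl bTstep [])

-- ===== PRECONDITION & SPEC =====
-- Pre_ excludes exactly the inputs on which A executes f['value'] = None (an override without
-- a 'value' whose (source, field) key matches a base filter or repeats an earlier override's
-- key): the stored None is not a str, so A's result there is not a value of the declared
-- return type List (String × String).
def Pre_apply_overrides_py (base_filters : List (List (String × String))) (overrides : List (List (String × String))) : Prop :=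
  ∀ i (h : i < overrides.length), pvGet overrides[i] "value" = none →
    pvKeyOf overrides[i] ∉ base_filters.map pvKeyOf ∧
    ∀ j (hj : j < i), pvKeyOf (overrides[j]'(Nat.lt_trans hj h)) ≠ pvKeyOf overrides[i]

instance (base_filters : List (List (String × String))) (overrides : List (List (String × String))) : Decidable (Pre_apply_overrides_py base_filters overrides) := by
  unfold Pre_apply_overrides_py; infer_instance

def pvWitness_apply_overrides_py : (List (List (String × String))) × (List (List (String × String))) :=
  ([[("source", "a"), ("field", "f"), ("value", "1")], [("field", "g")]],
   [[("source", "a"), ("field", "f"), ("value", "2")], [("source", "b"), ("field", "g"), ("value", "3")], [("source", "b"), ("field", "g"), ("value", "4")]])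

def Spec_apply_overrides_py (base_filters : List (List (String × String))) (overrides : List (List (String × String))) (out : List (List (String × String))) : Prop := out = apply_overrides_py_alt base_filters overrides
instance (base_filters : List (List (String × String))) (overrides : List (List (String × String))) (out : List (List (String × String))) : Decidable (Spec_apply_overrides_py base_filters overrides out) := by unfold Spec_apply_overrides_py; infer_instance

-- ===== CLAIM (what is proved, stated in full; the proofs are below) =====
def Claim_equal_apply_overrides_py : Prop := ∀ (base_filters : List (List (String × String))) (overrides : List (List (String × String))), Dom_apply_overrides_py base_filters overrides → Pre_apply_overrides_py base_filters overrides → Spec_apply_overrides_py base_filters overrides (apply_overrides_py base_filters overrides)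

-- ===== LEMMAS AND PROOFS =====

theorem pvGet_setv_ne (f : pvD) (v : Option String) (k : String) (hk : k ≠ "value") :
    pvGet (pvSetV f v) k = pvGet f k := by
  cases v with
  | none => rfl
  | some s =>
    show ((PySem.Dict.mk f).insert "value" s).get? k = (PySem.Dict.mk f).get? k
    exact PySem.Dict.get?_insert_of_ne _ _ hk

theorem pvKey_setv (f : pvD) (v : Option String) : pvKeyOf (pvSetV f v) = pvKeyOf f := by
  unfold pvKeyOf
  rw [pvGet_setv_ne _ _ _ (by decide), pvGet_setv_ne _ _ _ (by decide)]

theorem pvSetv_setv (f : pvD) (a : Option String) (b : String) :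
    pvSetV (pvSetV f a) (some b) = pvSetV f (some b) := by
  cases a with
  | none => rfl
  | some s =>
    show (((PySem.Dict.mk f).insert "value" s).insert "value" b).items
        = ((PySem.Dict.mk f).insert "value" b).items
    rw [PySem.Dict.insert_insert_self]

theorem aUpd_none (k : pvK) (v : Option String) (M : List pvD)
    (h : ∀ f ∈ M, pvKeyOf f ≠ k) : aUpd k v M = none := by
  induction M with
  | nil => rfl
  | cons f rest ih =>
    simp only [aUpd, if_neg (h f (by simp))]
    rw [ih (fun g hg => h g (by simp [hg]))]
    rfl

theorem aUpd_split (k : pvK) (v : Option String) (P R : List pvD) (f₀ : pvD)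
    (hP : ∀ f ∈ P, pvKeyOf f ≠ k) (hf : pvKeyOf f₀ = k) :
    aUpd k v (P ++ f₀ :: R) = some (P ++ pvSetV f₀ v :: R) := by
  induction P with
  | nil => simp [aUpd, hf]
  | cons g P ih =>
    simp only [List.cons_append, aUpd, if_neg (hP g (by simp))]
    rw [ih (fun x hx => hP x (by simp [hx]))]
    rfl

theorem bLookup_tstep_ne (T : List (pvK × pvE)) (o : pvD) (q : pvK) (h : q ≠ pvKeyOf o) :
    bLookup (bTstep T o) q = bLookup T q := by
  induction T with
  | nil =>
    simp only [bTstep, bLookup]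
    rw [if_neg (fun h' : pvKeyOf o = q => h h'.symm)]
  | cons ke rest ih =>
    obtain ⟨k, e⟩ := ke
    by_cases hk : k = pvKeyOf o
    · have hkq : ¬ k = q := fun h' => h (h'.symm.trans hk)
      simp only [bTstep, if_pos hk, bLookup, if_neg hkq]
    · simp only [bTstep, if_neg hk, bLookup]
      by_cases hq : k = q
      · simp [hq]
      · simp [hq, ih]

theorem bLookup_eq_none (T : List (pvK × pvE)) (q : pvK) :
    bLookup T q = none ↔ q ∉ T.map (·.1) := by
  induction T with
  | nil => simp [bLookup]
  | cons ke rest ih =>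
    obtain ⟨k, e⟩ := ke
    by_cases hq : k = q
    · subst hq; simp [bLookup]
    · have hqk : ¬ q = k := fun h => hq h.symm
      simp only [bLookup, if_neg hq, List.map_cons, List.mem_cons, ih]
      tauto

theorem bLookup_tstep_self (T : List (pvK × pvE)) (o : pvD) :
    bLookup (bTstep T o) (pvKeyOf o)
      = some (pvGet o "value",
          match bLookup T (pvKeyOf o) with
          | some e => (e.2.1, e.2.2 + 1)
          | none => (o, 1)) := by
  induction T with
  | nil => simp [bTstep, bLookup]
  | cons ke rest ih =>
    obtain ⟨k, e⟩ := ke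
    by_cases hk : k = pvKeyOf o
    · simp [bTstep, if_pos hk, bLookup, hk]
    · simp only [bTstep, if_neg hk, bLookup, if_neg hk, ih]

theorem bTstep_not_mem (T : List (pvK × pvE)) (o : pvD) (h : pvKeyOf o ∉ T.map (·.1)) :
    bTstep T o = T ++ [(pvKeyOf o, (pvGet o "value", o, 1))] := by
  induction T with
  | nil => rfl
  | cons ke rest ih =>
    obtain ⟨k, e⟩ := ke
    simp only [List.map_cons, List.mem_cons] at h
    push_neg at h
    simp only [bTstep, if_neg (fun h' : k = pvKeyOf o => h.1 h'.symm), List.cons_append,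
      ih h.2]

theorem bTstep_split (T₁ T₂ : List (pvK × pvE)) (e : pvE) (o : pvD)
    (h₁ : pvKeyOf o ∉ T₁.map (·.1)) :
    bTstep (T₁ ++ (pvKeyOf o, e) :: T₂) o
      = T₁ ++ (pvKeyOf o, (pvGet o "value", e.2.1, e.2.2 + 1)) :: T₂ := by
  induction T₁ with
  | nil => simp [bTstep]
  | cons ke rest ih =>
    obtain ⟨k, e'⟩ := ke
    simp only [List.map_cons, List.mem_cons] at h₁
    push_neg at h₁
    simp only [List.cons_append, bTstep, if_neg (fun h' : k = pvKeyOf o => h₁.1 h'.symm),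
      ih h₁.2]

theorem bTstep_keys (T : List (pvK × pvE)) (o : pvD) :
    (bTstep T o).map (·.1)
      = if pvKeyOf o ∈ T.map (·.1) then T.map (·.1) else T.map (·.1) ++ [pvKeyOf o] := by
  induction T with
  | nil => simp [bTstep]
  | cons ke rest ih =>
    obtain ⟨k, e⟩ := ke
    by_cases hk : k = pvKeyOf o
    · simp [bTstep, if_pos hk, hk]
    · have hne : ¬ pvKeyOf o = k := fun h' => hk h'.symm
      by_cases hm : pvKeyOf o ∈ rest.map (·.1)
      · simp [bTstep, if_neg hk, ih, hm, hne]
      · simp [bTstep, if_neg hk, ih, hm, hne]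

theorem bTable_keys_sub (ovs : List pvD) (T : List (pvK × pvE)) :
    ∀ q ∈ (ovs.foldl bTstep T).map (·.1), q ∈ T.map (·.1) ∨ q ∈ ovs.map pvKeyOf := by
  induction ovs generalizing T with
  | nil => intro q hq; exact Or.inl hq
  | cons o ovs ih =>
    intro q hq
    rcases ih (bTstep T o) q hq with h | h
    · rw [bTstep_keys] at h
      split_ifs at h with hm
      · exact Or.inl h
      · rcases List.mem_append.mp h with h | h
        · exact Or.inl h
        · simp at h; simp [h]
    · simp [h]

theorem bTable_nodup (ovs : List pvD) (T : List (pvK × pvE)) (h : (T.map (·.1)).Nodup) :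
    ((ovs.foldl bTstep T).map (·.1)).Nodup := by
  induction ovs generalizing T with
  | nil => exact h
  | cons o ovs ih =>
    apply ih
    rw [bTstep_keys]
    split_ifs with hm
    · exact h
    · simp only [List.nodup_append, List.nodup_singleton, true_and, and_true, h]
      intro a ha b hb
      simp only [List.mem_singleton] at hb
      subst hb
      exact fun he => hm (he ▸ ha)

theorem bTstep_fd (T : List (pvK × pvE)) (o : pvD)
    (h : ∀ e ∈ T, pvKeyOf e.2.2.1 = e.1) : ∀ e ∈ bTstep T o, pvKeyOf e.2.2.1 = e.1 := by
  induction T with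
  | nil => intro e he; simp [bTstep] at he; subst he; rfl
  | cons ke rest ih =>
    obtain ⟨k, e'⟩ := ke
    intro e he
    by_cases hk : k = pvKeyOf o
    · simp only [bTstep, if_pos hk, List.mem_cons] at he
      rcases he with he | he
      · subst he; exact h (k, e') (by simp)
      · exact h e (by simp [he])
    · simp only [bTstep, if_neg hk, List.mem_cons] at he
      rcases he with he | he
      · subst he; exact h (k, e') (by simp)
      · exact ih (fun x hx => h x (by simp [hx])) e he

theorem bTable_fd (ovs : List pvD) (T : List (pvK × pvE))
    (h : ∀ e ∈ T, pvKeyOf e.2.2.1 = e.1) :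
    ∀ e ∈ ovs.foldl bTstep T, pvKeyOf e.2.2.1 = e.1 := by
  induction ovs generalizing T with
  | nil => exact h
  | cons o ovs ih => exact ih (bTstep T o) (bTstep_fd T o h)

theorem bTstep_cnt (T : List (pvK × pvE)) (o : pvD)
    (h : ∀ e ∈ T, 1 ≤ e.2.2.2) : ∀ e ∈ bTstep T o, 1 ≤ e.2.2.2 := by
  induction T with
  | nil => intro e he; simp [bTstep] at he; subst he; simp
  | cons ke rest ih =>
    obtain ⟨k, e'⟩ := ke
    intro e he
    by_cases hk : k = pvKeyOf o
    · simp only [bTstep, if_pos hk, List.mem_cons] at he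
      rcases he with he | he
      · subst he; simp
      · exact h e (by simp [he])
    · simp only [bTstep, if_neg hk, List.mem_cons] at he
      rcases he with he | he
      · subst he; exact h (k, e') (by simp)
      · exact ih (fun x hx => h x (by simp [hx])) e he

theorem bTable_cnt (ovs : List pvD) (T : List (pvK × pvE))
    (h : ∀ e ∈ T, 1 ≤ e.2.2.2) :
    ∀ e ∈ ovs.foldl bTstep T, 1 ≤ e.2.2.2 := by
  induction ovs generalizing T with
  | nil => exact h
  | cons o ovs ih => exact ih (bTstep T o) (bTstep_cnt T o h)

theorem bPass_empty (xs : List pvD) (c : List pvK) : bPass [] xs c = (xs, c) := by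
  induction xs generalizing c with
  | nil => rfl
  | cons f rest ih => simp [bPass, bLookup, ih]

theorem bPass_append (T : List (pvK × pvE)) (xs ys : List pvD) (c : List pvK) :
    bPass T (xs ++ ys) c
      = ((bPass T xs c).1 ++ (bPass T ys (bPass T xs c).2).1, (bPass T ys (bPass T xs c).2).2) := by
  induction xs generalizing c with
  | nil => simp [bPass]
  | cons f rest ih =>
    simp only [List.cons_append, bPass]
    cases hl : bLookup T (pvKeyOf f) with
    | some e =>
      by_cases hc : pvKeyOf f ∈ c
      · simp [hc, ih]
      · simp [hc, ih]
    | none => simp [ih]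

theorem bPass_keys (T : List (pvK × pvE)) (xs : List pvD) (c : List pvK) :
    (bPass T xs c).1.map pvKeyOf = xs.map pvKeyOf := by
  induction xs generalizing c with
  | nil => rfl
  | cons f rest ih =>
    simp only [bPass]
    cases hl : bLookup T (pvKeyOf f) with
    | some e =>
      by_cases hc : pvKeyOf f ∈ c
      · simp [hc, ih]
      · simp [hc, ih, pvKey_setv]
    | none => simp [ih]

theorem bPass_consumed (T : List (pvK × pvE)) (xs : List pvD) (c : List pvK) (q : pvK) :
    q ∈ (bPass T xs c).2 ↔ q ∈ c ∨ (q ∈ T.map (·.1) ∧ q ∈ xs.map pvKeyOf) := by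
  induction xs generalizing c with
  | nil => simp [bPass]
  | cons f rest ih =>
    simp only [bPass, List.map_cons, List.mem_cons]
    cases hl : bLookup T (pvKeyOf f) with
    | some e =>
      have hmem : pvKeyOf f ∈ T.map (·.1) := by
        by_contra hn
        rw [← bLookup_eq_none T (pvKeyOf f)] at hn
        simp [hl] at hn
      by_cases hc : pvKeyOf f ∈ c
      · simp only [if_pos hc, ih]
        constructor
        · rintro (h | ⟨h1, h2⟩)
          · exact Or.inl h
          · exact Or.inr ⟨h1, Or.inr h2⟩
        · rintro (h | ⟨h1, h2 | h2⟩)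
          · exact Or.inl h
          · subst h2; exact Or.inl hc
          · exact Or.inr ⟨h1, h2⟩
      · simp only [if_neg hc, ih, List.mem_cons]
        constructor
        · rintro ((h | h) | ⟨h1, h2⟩)
          · subst h; exact Or.inr ⟨hmem, Or.inl rfl⟩
          · exact Or.inl h
          · exact Or.inr ⟨h1, Or.inr h2⟩
        · rintro (h | ⟨h1, h2 | h2⟩)
          · exact Or.inl (Or.inr h)
          · subst h2; exact Or.inl (Or.inl rfl)
          · exact Or.inr ⟨h1, h2⟩
    | none =>
      have hmem : pvKeyOf f ∉ T.map (·.1) := (bLookup_eq_none T (pvKeyOf f)).mp hl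
      simp only [ih]
      constructor
      · rintro (h | ⟨h1, h2⟩)
        · exact Or.inl h
        · exact Or.inr ⟨h1, Or.inr h2⟩
      · rintro (h | ⟨h1, h2 | h2⟩)
        · exact Or.inl h
        · subst h2; exact absurd h1 hmem
        · exact Or.inr ⟨h1, h2⟩

theorem bPass_tstep_ne (T : List (pvK × pvE)) (o : pvD) (xs : List pvD) (c : List pvK)
    (h : ∀ f ∈ xs, pvKeyOf f ≠ pvKeyOf o) :
    bPass (bTstep T o) xs c = bPass T xs c := by
  induction xs generalizing c with
  | nil => rfl
  | cons f rest ih =>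
    have hf : pvKeyOf f ≠ pvKeyOf o := h f (by simp)
    have hrest : ∀ g ∈ rest, pvKeyOf g ≠ pvKeyOf o := fun g hg => h g (by simp [hg])
    simp only [bPass, bLookup_tstep_ne T o (pvKeyOf f) hf]
    cases hl : bLookup T (pvKeyOf f) with
    | some e =>
      by_cases hc : pvKeyOf f ∈ c
      · simp [hc, ih _ hrest]
      · simp [hc, ih _ hrest]
    | none => simp [ih _ hrest]

theorem bPass_tstep_skip (T : List (pvK × pvE)) (o : pvD) (xs : List pvD) (c₁ c₂ : List pvK)
    (hc : ∀ q, q ∈ c₁ ↔ q = pvKeyOf o ∨ q ∈ c₂)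
    (h : pvKeyOf o ∈ c₂ ∨ pvKeyOf o ∉ T.map (·.1)) :
    (bPass (bTstep T o) xs c₁).1 = (bPass T xs c₂).1 := by
  induction xs generalizing c₁ c₂ with
  | nil => rfl
  | cons f rest ih =>
    by_cases hf : pvKeyOf f = pvKeyOf o
    · have hlk : ∃ e', bLookup (bTstep T o) (pvKeyOf f) = some e' := by
        cases hl : bLookup (bTstep T o) (pvKeyOf f) with
        | some e' => exact ⟨e', rfl⟩
        | none =>
          exfalso
          have := (bLookup_eq_none _ _).mp hl
          rw [bTstep_keys, hf] at this
          split_ifs at this with hm <;> simp [hm] at this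
      obtain ⟨e', he'⟩ := hlk
      have hfc₁ : pvKeyOf f ∈ c₁ := (hc _).mpr (Or.inl hf)
      simp only [bPass, he', if_pos hfc₁]
      cases hl₂ : bLookup T (pvKeyOf f) with
      | some e₂ =>
        have hmem : pvKeyOf f ∈ T.map (·.1) := by
          by_contra hn
          rw [← bLookup_eq_none T (pvKeyOf f)] at hn
          simp [hl₂] at hn
        have hfc₂ : pvKeyOf f ∈ c₂ := by
          rcases h with h | h
          · exact hf ▸ h
          · exact absurd (hf ▸ hmem) h
        simp only [if_pos hfc₂]
        simp [ih c₁ c₂ hc h]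
      | none => simp [ih c₁ c₂ hc h]
    · simp only [bPass, bLookup_tstep_ne T o (pvKeyOf f) hf]
      cases hl : bLookup T (pvKeyOf f) with
      | some e =>
        have hcc : pvKeyOf f ∈ c₁ ↔ pvKeyOf f ∈ c₂ := by
          rw [hc]; simp [hf]
        by_cases hc2 : pvKeyOf f ∈ c₂
        · simp only [if_pos (hcc.mpr hc2), if_pos hc2]
          simp [ih c₁ c₂ hc h]
        · simp only [if_neg (fun hx => hc2 (hcc.mp hx)), if_neg hc2]
          have hc' : ∀ q, q ∈ pvKeyOf f :: c₁ ↔ q = pvKeyOf o ∨ q ∈ pvKeyOf f :: c₂ := by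
            intro q; simp only [List.mem_cons, hc q]; tauto
          have h' : pvKeyOf o ∈ pvKeyOf f :: c₂ ∨ pvKeyOf o ∉ T.map (·.1) := by
            rcases h with h | h
            · exact Or.inl (by simp [h])
            · exact Or.inr h
          simp [ih _ _ hc' h']
      | none => simp [ih c₁ c₂ hc h]

theorem first_split {α β : Type} (g : α → β) (xs : List α) (q : β) (h : q ∈ xs.map g) :
    ∃ pre y post, xs = pre ++ y :: post ∧ g y = q ∧ q ∉ pre.map g := by
  induction xs with
  | nil => simp at h
  | cons x xs ih =>
    by_cases hx : g x = q
    · exact ⟨[], x, xs, by simp, hx, by simp⟩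
    · have h' : q ∈ xs.map g := by
        simp only [List.map_cons, List.mem_cons] at h
        rcases h with h | h
        · exact absurd h.symm hx
        · exact h
      obtain ⟨pre, y, post, h1, h2, h3⟩ := ih h'
      exact ⟨x :: pre, y, post, by simp [h1], h2, by
        simp only [List.map_cons, List.mem_cons]
        rintro (h4 | h4)
        · exact hx h4.symm
        · exact h3 h4⟩

theorem filter_tstep (T : List (pvK × pvE)) (o : pvD) (p : pvK → Bool)
    (hp : p (pvKeyOf o) = false) :
    (bTstep T o).filter (fun e => p e.1) = T.filter (fun e => p e.1) := by
  induction T with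
  | nil => simp [bTstep, List.filter, hp]
  | cons ke rest ih =>
    obtain ⟨k, e⟩ := ke
    by_cases hk : k = pvKeyOf o
    · subst hk
      simp only [bTstep, if_pos rfl]
      simp [List.filter_cons, hp]
    · simp only [bTstep, if_neg hk]
      simp [List.filter_cons, ih]

theorem bMerge_eq (base : List pvD) (T : List (pvK × pvE)) :
    bMerge base T
      = (bPass T base []).1
        ++ (T.filter (fun en => decide (en.1 ∉ base.map pvKeyOf))).map (fun en => bFin en.2) := by
  unfold bMerge
  refine congrArg (fun l : List (pvK × pvE) => (bPass T base []).1 ++ List.map (fun en => bFin en.2) l)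
    (List.filter_congr ?_)
  intro e he
  have : e.1 ∈ T.map (·.1) := List.mem_map_of_mem he
  simp only [decide_eq_decide, bPass_consumed]
  simp [this]

theorem bPass_cons_found (T : List (pvK × pvE)) (f : pvD) (rest : List pvD) (c : List pvK)
    (e : pvE) (hl : bLookup T (pvKeyOf f) = some e) (hc : pvKeyOf f ∉ c) :
    bPass T (f :: rest) c
      = (pvSetV f e.1 :: (bPass T rest (pvKeyOf f :: c)).1, (bPass T rest (pvKeyOf f :: c)).2) := by
  simp [bPass, hl, hc]

theorem bPass_cons_none (T : List (pvK × pvE)) (f : pvD) (rest : List pvD) (c : List pvK)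
    (hl : bLookup T (pvKeyOf f) = none) :
    bPass T (f :: rest) c = (f :: (bPass T rest c).1, (bPass T rest c).2) := by
  simp [bPass, hl]

theorem key_fin (e : pvK × pvE) (h : pvKeyOf e.2.2.1 = e.1) : pvKeyOf (bFin e.2) = e.1 := by
  unfold bFin
  split_ifs with h1
  · rw [pvKey_setv]; exact h
  · exact h

theorem mem_pass_keys (T : List (pvK × pvE)) (xs : List pvD) (c : List pvK) (f : pvD)
    (hf : f ∈ (bPass T xs c).1) : pvKeyOf f ∈ xs.map pvKeyOf := by
  rw [← bPass_keys T xs c]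
  exact List.mem_map_of_mem hf

theorem mem_app_keys (T : List (pvK × pvE)) (P : pvK × pvE → Bool)
    (hfd : ∀ e ∈ T, pvKeyOf e.2.2.1 = e.1) :
    ∀ f ∈ (T.filter P).map (fun en => bFin en.2), pvKeyOf f ∈ T.map (·.1) := by
  intro f hf
  obtain ⟨en, hen, rfl⟩ := List.mem_map.mp hf
  have hT : en ∈ T := (List.mem_filter.mp hen).1
  rw [key_fin en (hfd en hT)]
  exact List.mem_map_of_mem hT

theorem crux (T : List (pvK × pvE)) (o : pvD) (base : List pvD)
    (hnd : (T.map (·.1)).Nodup)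
    (hfd : ∀ e ∈ T, pvKeyOf e.2.2.1 = e.1)
    (hcnt : ∀ e ∈ T, 1 ≤ e.2.2.2)
    (hnone : pvGet o "value" = none → pvKeyOf o ∉ base.map pvKeyOf ∧ pvKeyOf o ∉ T.map (·.1)) :
    bMerge base (bTstep T o)
      = match aUpd (pvKeyOf o) (pvGet o "value") (bMerge base T) with
        | some m => m
        | none => bMerge base T ++ [o] := by
  rw [bMerge_eq, bMerge_eq]
  by_cases hbk : pvKeyOf o ∈ base.map pvKeyOf
  · -- the override key matches some base filter: the first such filter gets the value
    obtain ⟨s, hs⟩ : ∃ s, pvGet o "value" = some s := by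
      cases hvn : pvGet o "value" with
      | none => exact absurd hbk (hnone hvn).1
      | some s => exact ⟨s, rfl⟩
    obtain ⟨pre, f₀, post, hb, hkf, hpre⟩ := first_split pvKeyOf base (pvKeyOf o) hbk
    subst hb
    have hfilters :
        (bTstep T o).filter (fun en => decide (en.1 ∉ (pre ++ f₀ :: post).map pvKeyOf))
          = T.filter (fun en => decide (en.1 ∉ (pre ++ f₀ :: post).map pvKeyOf)) :=
      filter_tstep T o (fun q => decide (q ∉ (pre ++ f₀ :: post).map pvKeyOf))
        (by simp only [decide_eq_false_iff_not, not_not]; exact hbk)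
    have hpijk : ∀ f ∈ pre, pvKeyOf f ≠ pvKeyOf o :=
      fun f hf he => hpre (he ▸ List.mem_map_of_mem hf)
    have hpre1 : bPass (bTstep T o) pre [] = bPass T pre [] :=
      bPass_tstep_ne _ _ _ _ hpijk
    have hk₀c' : pvKeyOf o ∉ (bPass T pre []).2 := by
      intro hx
      have := (bPass_consumed T pre [] (pvKeyOf o)).mp hx
      simp only [List.mem_nil_iff, false_or] at this
      exact hpre this.2
    rw [bPass_append, bPass_append, hpre1, hfilters]
    cases hT : bLookup T (pvKeyOf o) with
    | some e =>
      have hT' := bLookup_tstep_self T o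
      rw [hT] at hT'
      rw [bPass_cons_found (bTstep T o) f₀ post _ _ (by rw [hkf]; exact hT') (hkf ▸ hk₀c'),
          bPass_cons_found T f₀ post _ e (by rw [hkf]; exact hT) (hkf ▸ hk₀c')]
      have hposts :
          (bPass (bTstep T o) post (pvKeyOf f₀ :: (bPass T pre []).2)).1
            = (bPass T post (pvKeyOf f₀ :: (bPass T pre []).2)).1 :=
        bPass_tstep_skip T o post _ _
          (fun q => by
            simp only [List.mem_cons, hkf]
            constructor
            · rintro (h | h)
              · exact Or.inl h
              · exact Or.inr (Or.inr h)
            · rintro (h | h | h)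
              · exact Or.inl h
              · exact Or.inl h
              · exact Or.inr h)
          (Or.inl (by simp [hkf]))
      have haUpd :
          aUpd (pvKeyOf o) (pvGet o "value")
            ((bPass T pre []).1
              ++ (pvSetV f₀ e.1 :: (bPass T post (pvKeyOf f₀ :: (bPass T pre []).2)).1)
              ++ (T.filter (fun en => decide (en.1 ∉ (pre ++ f₀ :: post).map pvKeyOf))).map
                   (fun en => bFin en.2))
            = some ((bPass T pre []).1
                ++ pvSetV (pvSetV f₀ e.1) (pvGet o "value")
                   :: ((bPass T post (pvKeyOf f₀ :: (bPass T pre []).2)).1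
                     ++ (T.filter (fun en => decide (en.1 ∉ (pre ++ f₀ :: post).map pvKeyOf))).map
                          (fun en => bFin en.2))) := by
        rw [List.append_assoc, List.cons_append]
        exact aUpd_split _ _ _ _ _
          (fun f hf he => hpre (he ▸ (mem_pass_keys T pre [] f hf)))
          (by rw [pvKey_setv, hkf])
      rw [haUpd]
      rw [hposts]
      rw [hs, pvSetv_setv]
      simp [List.append_assoc]
    | none =>
      have hTmem : pvKeyOf o ∉ T.map (·.1) := (bLookup_eq_none T (pvKeyOf o)).mp hT
      have hT' := bLookup_tstep_self T o
      rw [hT] at hT'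
      rw [bPass_cons_found (bTstep T o) f₀ post _ _ (by rw [hkf]; exact hT') (hkf ▸ hk₀c'),
          bPass_cons_none T f₀ post _ (by rw [hkf]; exact hT)]
      have hposts :
          (bPass (bTstep T o) post (pvKeyOf f₀ :: (bPass T pre []).2)).1
            = (bPass T post (bPass T pre []).2).1 :=
        bPass_tstep_skip T o post _ _
          (fun q => by simp only [List.mem_cons, hkf]) (Or.inr hTmem)
      have haUpd :
          aUpd (pvKeyOf o) (pvGet o "value")
            ((bPass T pre []).1 ++ (f₀ :: (bPass T post (bPass T pre []).2).1)
              ++ (T.filter (fun en => decide (en.1 ∉ (pre ++ f₀ :: post).map pvKeyOf))).map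
                   (fun en => bFin en.2))
            = some ((bPass T pre []).1
                ++ pvSetV f₀ (pvGet o "value")
                   :: ((bPass T post (bPass T pre []).2).1
                     ++ (T.filter (fun en => decide (en.1 ∉ (pre ++ f₀ :: post).map pvKeyOf))).map
                          (fun en => bFin en.2))) := by
        rw [List.append_assoc, List.cons_append]
        exact aUpd_split _ _ _ _ _
          (fun f hf he => hpre (he ▸ (mem_pass_keys T pre [] f hf)))
          hkf
      rw [haUpd, hposts]
      simp [List.append_assoc]
  · -- no base filter matches: the pass over base is unaffected
    have hbase_ne : ∀ f ∈ base, pvKeyOf f ≠ pvKeyOf o :=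
      fun f hf he => hbk (he ▸ List.mem_map_of_mem hf)
    have hpass : bPass (bTstep T o) base [] = bPass T base [] :=
      bPass_tstep_ne _ _ _ _ hbase_ne
    rw [hpass]
    by_cases hT : pvKeyOf o ∈ T.map (·.1)
    · -- key already in the table: the appended entry gets the new last value
      obtain ⟨s, hs⟩ : ∃ s, pvGet o "value" = some s := by
        cases hvn : pvGet o "value" with
        | none => exact absurd hT (hnone hvn).2
        | some s => exact ⟨s, rfl⟩
      obtain ⟨T₁, y, T₂, hTeq, hy1, hnp⟩ := first_split (·.1) T (pvKeyOf o) hT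
      obtain ⟨ky, ey⟩ := y
      obtain rfl : ky = pvKeyOf o := hy1
      have hcy : 1 ≤ ey.2.2 := hcnt (pvKeyOf o, ey) (by rw [hTeq]; simp)
      have hfy : pvKeyOf ey.2.1 = pvKeyOf o := hfd (pvKeyOf o, ey) (by rw [hTeq]; simp)
      have hTstep : bTstep T o = T₁ ++ (pvKeyOf o, (pvGet o "value", ey.2.1, ey.2.2 + 1)) :: T₂ := by
        rw [hTeq]
        exact bTstep_split T₁ T₂ ey o hnp
      have hkeep : decide (pvKeyOf o ∉ base.map pvKeyOf) = true := by simp [hbk]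
      rw [hTstep, hTeq]
      simp only [List.filter_append, List.filter_cons, hkeep, List.map_append, List.map_cons,
        if_true, if_pos rfl]
      have hfe : bFin (pvGet o "value", ey.2.1, ey.2.2 + 1) = pvSetV (bFin ey) (pvGet o "value") := by
        unfold bFin
        simp only
        rw [if_pos (by omega : 1 < ey.2.2 + 1)]
        by_cases h1 : 1 < ey.2.2
        · rw [if_pos h1, hs, pvSetv_setv]
        · rw [if_neg h1]
      rw [hfe]
      have haUpd :
          aUpd (pvKeyOf o) (pvGet o "value")
            ((bPass (T₁ ++ (pvKeyOf o, ey) :: T₂) base []).1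
              ++ ((T₁.filter (fun en => decide (en.1 ∉ base.map pvKeyOf))).map (fun en => bFin en.2)
                ++ bFin ey
                   :: (T₂.filter (fun en => decide (en.1 ∉ base.map pvKeyOf))).map (fun en => bFin en.2)))
            = some (((bPass (T₁ ++ (pvKeyOf o, ey) :: T₂) base []).1
                ++ (T₁.filter (fun en => decide (en.1 ∉ base.map pvKeyOf))).map (fun en => bFin en.2))
                ++ pvSetV (bFin ey) (pvGet o "value")
                   :: (T₂.filter (fun en => decide (en.1 ∉ base.map pvKeyOf))).map (fun en => bFin en.2)) := by
        rw [← List.append_assoc]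
        refine aUpd_split _ _ _ _ _ ?_ ?_
        · intro f hf he
          rcases List.mem_append.mp hf with hf | hf
          · exact hbk (he ▸ mem_pass_keys (T₁ ++ (pvKeyOf o, ey) :: T₂) base [] f hf)
          · have := mem_app_keys T₁ _ (fun e he' => hfd e (by rw [hTeq]; simp [he'])) f hf
            exact hnp (he ▸ this)
        · exact key_fin (pvKeyOf o, ey) hfy
      rw [haUpd]
      simp [List.append_assoc]
    · -- brand-new key: appended at the end, A appends the override itself
      have hTstep : bTstep T o = T ++ [(pvKeyOf o, (pvGet o "value", o, 1))] :=
        bTstep_not_mem T o hT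
      have hkeep : decide (pvKeyOf o ∉ base.map pvKeyOf) = true := by simp [hbk]
      have haUpd :
          aUpd (pvKeyOf o) (pvGet o "value")
            ((bPass T base []).1
              ++ (T.filter (fun en => decide (en.1 ∉ base.map pvKeyOf))).map (fun en => bFin en.2))
            = none := by
        refine aUpd_none _ _ _ ?_
        intro f hf he
        rcases List.mem_append.mp hf with hf | hf
        · exact hbk (he ▸ mem_pass_keys T base [] f hf)
        · exact hT (he ▸ mem_app_keys T _ hfd f hf)
      rw [hTstep, haUpd]
      simp only [List.filter_append, List.filter_cons, hkeep, List.filter_nil, List.map_append,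
        List.map_cons, List.map_nil, if_true, if_pos rfl]
      have : bFin (pvGet o "value", o, 1) = o := by unfold bFin; simp
      rw [this]
      simp [List.append_assoc]

theorem pre_drop (base : List pvD) (ovs : List pvD) (o : pvD)
    (h : Pre_apply_overrides_py base (ovs ++ [o])) : Pre_apply_overrides_py base ovs := by
  intro i hi hv
  have hi' : i < (ovs ++ [o]).length := by simp; omega
  have hei : (ovs ++ [o])[i]'hi' = ovs[i]'hi := List.getElem_append_left hi
  have h' := h i hi' (by rw [hei]; exact hv)
  rw [hei] at h'
  refine ⟨h'.1, ?_⟩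
  intro j hj
  have hej : (ovs ++ [o])[j]'(Nat.lt_trans hj hi') = ovs[j]'(Nat.lt_trans hj hi) :=
    List.getElem_append_left (Nat.lt_trans hj hi)
  have := h'.2 j hj
  rw [hej] at this
  exact this

theorem pre_last (base : List pvD) (ovs : List pvD) (o : pvD)
    (h : Pre_apply_overrides_py base (ovs ++ [o])) :
    pvGet o "value" = none →
      pvKeyOf o ∉ base.map pvKeyOf ∧ pvKeyOf o ∉ (ovs.foldl bTstep []).map (·.1) := by
  intro hv
  have hlen : ovs.length < (ovs ++ [o]).length := by simp
  have he : (ovs ++ [o])[ovs.length]'hlen = o := by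
    simp
  have h' := h ovs.length hlen (by rw [he]; exact hv)
  rw [he] at h'
  refine ⟨h'.1, ?_⟩
  intro hm
  rcases bTable_keys_sub ovs [] _ hm with hx | hx
  · simp at hx
  · obtain ⟨x, hxm, hxe⟩ := List.mem_map.mp hx
    obtain ⟨j, hj, rfl⟩ := List.mem_iff_getElem.mp hxm
    have hej : (ovs ++ [o])[j]'(Nat.lt_trans hj hlen) = ovs[j]'hj :=
      List.getElem_append_left hj
    exact h'.2 j hj (by rw [hej, hxe])

theorem main_eq (base : List pvD) (ovs : List pvD) :
    Pre_apply_overrides_py base ovs →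
    apply_overrides_py base ovs = bMerge base (ovs.foldl bTstep []) := by
  induction ovs using List.reverseRecOn with
  | nil =>
    intro _
    simp [apply_overrides_py, bMerge, bPass_empty]
  | append_singleton ovs o ih =>
    intro hpre
    have ih' := ih (pre_drop base ovs o hpre)
    unfold apply_overrides_py at ih' ⊢
    rw [List.foldl_append, List.foldl_append, List.foldl_cons, List.foldl_nil,
      List.foldl_cons, List.foldl_nil, ih']
    exact (crux _ o base (bTable_nodup ovs [] (by simp)) (bTable_fd ovs [] (by simp))
      (bTable_cnt ovs [] (by simp)) (pre_last base ovs o hpre)).symm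

-- ===== VERDICT (by name: the statement is the Claim_ definition above) =====
theorem apply_overrides_py_spec : Claim_equal_apply_overrides_py := by
  intro base_filters overrides _ hpre
  unfold Spec_apply_overrides_py apply_overrides_py_alt
  exact main_eq base_filters overrides hpre
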